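-- pv_equiv track=rewrite | github.com/pypi-data/pypi-mirror-91 | packages/invoke-release/invoke_release-4.6.0-py2.py3-none-any.whl/invoke_release/tasks.py | _get_version_element_to_bump_if_any
-- ===== SOURCE A (Python) =====
-- MAJOR_VERSION_PREFIX = '- [MAJOR]'
--
-- MINOR_VERSION_PREFIX = '- [MINOR]'
--
-- PATCH_VERSION_PREFIX = '- [PATCH]'
--
-- def _get_version_element_to_bump_if_any(changelog_message):
--     untagged_commit_present = False
--     patch_commit_present = False
--     minor_commit_present = False
--
--     for line in changelog_message:
--         if line.startswith(MAJOR_VERSION_PREFIX):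
--             return MAJOR_VERSION_PREFIX
--         if line.startswith(MINOR_VERSION_PREFIX):
--             minor_commit_present = True
--         elif line.startswith(PATCH_VERSION_PREFIX):
--             patch_commit_present = True
--         else:
--             untagged_commit_present = True
--
--     version = PATCH_VERSION_PREFIX if patch_commit_present else None
--     version = MINOR_VERSION_PREFIX if minor_commit_present else version
--
--     return version if not untagged_commit_present else None
-- ===== SOURCE B (Python) =====
-- MAJOR_VERSION_PREFIX = '- [MAJOR]'
--
-- MINOR_VERSION_PREFIX = '- [MINOR]'
--
-- PATCH_VERSION_PREFIX = '- [PATCH]'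
--
-- def _get_version_element_to_bump_if_any(changelog_message):
--     lines = list(changelog_message)
--     if any(line.startswith(MAJOR_VERSION_PREFIX) for line in lines):
--         return MAJOR_VERSION_PREFIX
--     if any(not line.startswith(MINOR_VERSION_PREFIX)
--            and not line.startswith(PATCH_VERSION_PREFIX) for line in lines):
--         return None
--     if any(line.startswith(MINOR_VERSION_PREFIX) for line in lines):
--         return MINOR_VERSION_PREFIX
--     if any(line.startswith(PATCH_VERSION_PREFIX) for line in lines):
--         return PATCH_VERSION_PREFIX
--     return None
-- ===== Notes on version B (the rewrite author's own statement) =====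
-- stated objective: simpler
-- what changed: Replaces the single flag-tracking loop with independent short-circuiting any() scans tested in precedence order (MAJOR, untagged, MINOR, PATCH) over the materialized list.
import Mathlib
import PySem

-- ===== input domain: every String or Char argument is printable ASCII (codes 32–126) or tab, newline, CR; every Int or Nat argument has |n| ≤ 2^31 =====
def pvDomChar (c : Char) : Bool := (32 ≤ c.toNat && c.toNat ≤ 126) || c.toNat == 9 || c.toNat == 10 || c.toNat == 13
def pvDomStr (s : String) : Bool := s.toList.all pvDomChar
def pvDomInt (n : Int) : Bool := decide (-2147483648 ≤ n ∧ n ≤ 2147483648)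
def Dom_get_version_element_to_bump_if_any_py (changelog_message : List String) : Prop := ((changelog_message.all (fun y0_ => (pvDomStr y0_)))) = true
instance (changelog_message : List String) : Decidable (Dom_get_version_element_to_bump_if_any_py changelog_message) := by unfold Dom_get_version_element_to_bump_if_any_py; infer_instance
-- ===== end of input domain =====

-- B: independent short-circuiting any-scans in precedence order instead of A's single flag-tracking loop (objective: simpler).
-- ===== PORT A =====
def pvMAJOR : String := "- [MAJOR]"
def pvMINOR : String := "- [MINOR]"
def pvPATCH : String := "- [PATCH]"

def pvALoop : List String → Bool → Bool → Bool → Option String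
  | [], untagged, patch, minor =>
      let version : Option String := if patch then some pvPATCH else none
      let version : Option String := if minor then some pvMINOR else version
      if !untagged then version else none
  | line :: rest, untagged, patch, minor =>
      if PySem.Str.startswith line pvMAJOR then some pvMAJOR
      else if PySem.Str.startswith line pvMINOR then pvALoop rest untagged patch true
      else if PySem.Str.startswith line pvPATCH then pvALoop rest untagged true minor
      else pvALoop rest true patch minor

def get_version_element_to_bump_if_any_py (changelog_message : List String) : Option String :=
  pvALoop changelog_message false false false

-- ===== PORT B =====
def get_version_element_to_bump_if_any_py_alt (changelog_message : List String) : Option String :=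
  let lines := changelog_message
  if lines.any (fun line => PySem.Str.startswith line pvMAJOR) then some pvMAJOR
  else if lines.any (fun line => !(PySem.Str.startswith line pvMINOR)
                                 && !(PySem.Str.startswith line pvPATCH)) then none
  else if lines.any (fun line => PySem.Str.startswith line pvMINOR) then some pvMINOR
  else if lines.any (fun line => PySem.Str.startswith line pvPATCH) then some pvPATCH
  else none

-- ===== PRECONDITION & SPEC =====
def Spec_get_version_element_to_bump_if_any_py (changelog_message : List String) (out : Option String) : Prop := out = get_version_element_to_bump_if_any_py_alt changelog_message
instance (changelog_message : List String) (out : Option String) : Decidable (Spec_get_version_element_to_bump_if_any_py changelog_message out) := by unfold Spec_get_version_element_to_bump_if_any_py; infer_instance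

-- ===== CLAIM (what is proved, stated in full; the proofs are below) =====
def Claim_equal_get_version_element_to_bump_if_any_py : Prop := ∀ (changelog_message : List String), Dom_get_version_element_to_bump_if_any_py changelog_message → Spec_get_version_element_to_bump_if_any_py changelog_message (get_version_element_to_bump_if_any_py changelog_message)

-- ===== LEMMAS AND PROOFS =====
-- Generalized loop invariant: pvALoop with accumulated flags equals the scan formulation.
theorem pvALoop_eq (ls : List String) (u p m : Bool) :
    pvALoop ls u p m =
      if ls.any (fun l => PySem.Str.startswith l pvMAJOR) then some pvMAJOR
      else if u || ls.any (fun l => !(PySem.Str.startswith l pvMINOR)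
                                    && !(PySem.Str.startswith l pvPATCH)) then none
      else if m || ls.any (fun l => PySem.Str.startswith l pvMINOR) then some pvMINOR
      else if p || ls.any (fun l => PySem.Str.startswith l pvPATCH) then some pvPATCH
      else none := by
  induction ls generalizing u p m with
  | nil => simp [pvALoop]; cases u <;> cases p <;> cases m <;> simp
  | cons l rest ih =>
      simp only [pvALoop, List.any_cons, ih]
      by_cases hM : PySem.Chars.startswith l.toList pvMAJOR.toList = true <;>
        by_cases h1 : PySem.Chars.startswith l.toList pvMINOR.toList = true <;>
          by_cases h2 : PySem.Chars.startswith l.toList pvPATCH.toList = true <;>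
            simp [hM, h1, h2]

-- ===== VERDICT (by name: the statement is the Claim_ definition above) =====
theorem get_version_element_to_bump_if_any_py_spec : Claim_equal_get_version_element_to_bump_if_any_py := by
  intro changelog_message _
  unfold Spec_get_version_element_to_bump_if_any_py
  unfold get_version_element_to_bump_if_any_py get_version_element_to_bump_if_any_py_alt
  rw [pvALoop_eq]
  simp
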